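-- pv_equiv track=rewrite | github.com/tangkithang/HK-Bus-ETA | analyze_route.py | get_valid_hours_for_day
-- ===== SOURCE A (Python) =====
-- def get_valid_hours_for_day(freq_data, day_code):
--     """
--     Parses freq_data to return a set of valid hours (0-23) for the given day.
--     freq_data format example:
--     {'287': {'0600': ['0620', ...], ...}}
--     The keys '287' are DayMasks.
--     1=Mon, 2=Tue, 4=Wed, 8=Thu, 16=Fri, 32=Sat, 64=Sun.
--     287 = 1+2+4+8+16+256(Holiday) = Mon-Fri + Hol? No wait.
--     Actually standard is: 1=Mon, 2=Tue, 4=Wed, 8=Thu, 16=Fri, 32=Sat, 64=Sun, 128=Holiday.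
--     287 = 1+2+4+8+16+256 is 111110001?
--
--     Let's stick to simple day checking.
--     DAYS map: 0=Sun(64), 1=Mon(1), 2=Tue(2), 3=Wed(4), 4=Thu(8), 5=Fri(16), 6=Sat(32).
--     """
--     if not freq_data:
--         return set(range(24)) # If no data, allow all
--
--     # Map our day_code '0'-'6' to bitmask
--     # 0=Sun=64, 1=Mon=1, 2=Tue=2, 3=Wed=4, 4=Thu=8, 5=Fri=16, 6=Sat=32
--     # But wait, holidays might complicate. Let's look for matching mask.
--
--     target_mask = 0
--     d_int = int(day_code)
--     if d_int == 0: target_mask = 64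
--     elif d_int == 1: target_mask = 1
--     elif d_int == 2: target_mask = 2
--     elif d_int == 3: target_mask = 4
--     elif d_int == 4: target_mask = 8
--     elif d_int == 5: target_mask = 16
--     elif d_int == 6: target_mask = 32
--
--     valid_hours = set()
--
--     for mask_str, timings in freq_data.items():
--         try:
--             mask = int(mask_str)
--             if (mask & target_mask) > 0:
--                 # This timetable applies to this day
--                 # timings is dict: start_time -> [end_time, interval]
--                 # We care about the valid range [start_time, end_time + buffer]
--
--                 # Find min start and max end
--                 min_t = 2400
--                 max_t = 0
--
--                 for start_t_str, vals in timings.items():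
--                     # start_t_str like '0600'
--                     end_t_str = vals[0] # '0620'
--
--                     s = int(start_t_str)
--                     e = int(end_t_str)
--
--                     if s < min_t: min_t = s
--                     if e > max_t: max_t = e
--
--                 # Add buffer (e.g. 120 mins) to max_t to allow completion
--                 # max_t is HHMM format. This is tricky.
--                 # Convert to minutes from midnight
--                 def to_mins(hhmm):
--                     h = hhmm // 100
--                     m = hhmm % 100
--                     return h * 60 + m
--
--                 start_min = to_mins(min_t)
--                 end_min = to_mins(max_t) + 120 # 2 hours buffer
--
--                 # Convert back to hours arguments
--                 # For simplicity, we just check if hour H starts within [start_min, end_min]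
--
--                 for h in range(24):
--                     # Check if H:00 is within range
--                     # Allow logical day overlap (e.g. 2500)
--                     # If start_min is 0600 (360m) and end_min is 2500 (1500 + 120 = 1620m)
--                     # hour 4 (240m) -> No
--                     # hour 6 (360m) -> Yes
--                     # hour 23 (1380m) -> Yes
--                     # hour 0 (0m) -> treated as 24? No, standard day loop.
--
--                     # Normal day check
--                     h_mins = h * 60
--                     if start_min <= h_mins <= end_min:
--                         valid_hours.add(h)
--
--                     # Next day wrap check (for late night services > 2400)
--                     h_mins_next = (h + 24) * 60
--                     if start_min <= h_mins_next <= end_min: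
--                         valid_hours.add(h)
--
--         except:
--             pass
--
--     return valid_hours
-- ===== SOURCE B (Python) =====
-- def get_valid_hours_for_day(freq_data, day_code):
--     """Same result as the original, but the inner 24-hour scan is replaced by
--     closed-form hour bands computed with ceil/floor division."""
--     if not freq_data:
--         return set(range(24))
--     target_mask = {0: 64, 1: 1, 2: 2, 3: 4, 4: 8, 5: 16, 6: 32}.get(int(day_code), 0)
--     valid_hours = set()
--     for mask_str, timings in freq_data.items():
--         try:
--             if int(mask_str) & target_mask <= 0:
--                 continue
--             starts = [int(s) for s in timings]
--             ends = [int(v[0]) for v in timings.values()]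
--             min_t = min([2400] + starts)
--             max_t = max([0] + ends)
--             start_min = (min_t // 100) * 60 + min_t % 100
--             end_min = (max_t // 100) * 60 + max_t % 100 + 120
--             lo = -(-start_min // 60)   # least h with start_min <= 60*h
--             hi = end_min // 60         # greatest h with 60*h <= end_min
--             valid_hours.update(range(max(lo - 24, 0), min(hi - 24, 23) + 1))  # wrapped band
--             valid_hours.update(range(max(lo, 0), min(hi, 23) + 1))            # same-day band
--         except Exception:
--             pass
--     return valid_hours
-- ===== Notes on version B (the rewrite author's own statement) =====
-- stated objective: simpler
-- what changed: The per-mask inner loop that tests each of the 24 hours (twice, for the same day and the wrapped day) is replaced by closed-form hour bands: ceil/floor division gives the contiguous band of hours inside [start_min,end_min] and its 24h-shifted wrap band, which are added directly; the min/max scan becomes comprehensions with min/max over [2400]+starts and [0]+ends.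
import Mathlib
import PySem

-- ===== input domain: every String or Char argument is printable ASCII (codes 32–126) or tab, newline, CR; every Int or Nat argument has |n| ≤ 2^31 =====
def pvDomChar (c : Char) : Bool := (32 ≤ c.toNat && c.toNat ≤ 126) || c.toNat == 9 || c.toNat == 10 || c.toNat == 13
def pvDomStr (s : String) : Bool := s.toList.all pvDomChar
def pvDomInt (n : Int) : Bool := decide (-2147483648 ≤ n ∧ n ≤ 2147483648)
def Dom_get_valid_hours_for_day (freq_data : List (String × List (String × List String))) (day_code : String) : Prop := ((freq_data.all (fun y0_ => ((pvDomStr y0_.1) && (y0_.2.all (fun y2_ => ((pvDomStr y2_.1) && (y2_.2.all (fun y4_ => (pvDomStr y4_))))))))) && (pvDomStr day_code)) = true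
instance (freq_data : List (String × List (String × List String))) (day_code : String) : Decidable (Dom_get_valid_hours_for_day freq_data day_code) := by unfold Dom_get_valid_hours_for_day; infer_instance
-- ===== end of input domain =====

-- B replaces A's per-mask 24-hour membership loop by closed-form hour bands (ceil/floor
-- division) and A's hand-written min/max scan by min/max over comprehensions; same result set.

-- ===== PORT A =====
-- A's nested helper `to_mins` (h = hhmm // 100; m = hhmm % 100; h*60 + m)
def gvhA_toMins (hhmm : Int) : Int :=
  PySem.Int.floordiv hhmm 100 * 60 + PySem.Int.mod hhmm 100

-- A's `for start_t_str, vals in timings.items()` min/max scan; `none` = an exception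
-- (IndexError on vals[0] or ValueError in int(...)) somewhere in the scan.
def gvhA_scan : List (String × List String) → Int → Int → Option (Int × Int)
  | [], min_t, max_t => some (min_t, max_t)
  | (start_t_str, vals) :: rest, min_t, max_t =>
    match PySem.List.pyGet? vals 0 with
    | none => none
    | some end_t_str =>
      match PySem.Int.ofStr? start_t_str, PySem.Int.ofStr? end_t_str with
      | some s, some e =>
          gvhA_scan rest (if s < min_t then s else min_t) (if e > max_t then e else max_t)
      | _, _ => none

-- A's `for h in range(24)` loop with the two membership checks
def gvhA_hours (start_min end_min : Int) (valid : PySem.Set Int) : PySem.Set Int :=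
  (PySem.List.pyRange 0 24 1).foldl (fun v h =>
    let h_mins := h * 60
    let v' := if start_min ≤ h_mins ∧ h_mins ≤ end_min then PySem.Set.add v h else v
    let h_mins_next := (h + 24) * 60
    if start_min ≤ h_mins_next ∧ h_mins_next ≤ end_min then PySem.Set.add v' h else v') valid

-- one iteration of A's `for mask_str, timings in freq_data.items()`; any `none` from a
-- primitive is A's bare `except: pass` (valid_hours unchanged)
def gvhA_mask (target_mask : Int) (valid : PySem.Set Int) (mask_str : String)
    (timings : List (String × List String)) : PySem.Set Int :=
  match PySem.Int.ofStr? mask_str with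
  | none => valid
  | some mask =>
    if PySem.Int.band mask target_mask > 0 then
      match gvhA_scan timings 2400 0 with
      | none => valid
      | some (min_t, max_t) =>
          gvhA_hours (gvhA_toMins min_t) (gvhA_toMins max_t + 120) valid
    else valid

def get_valid_hours_for_day (freq_data : List (String × List (String × List String))) (day_code : String) : List Int :=
  if freq_data.isEmpty then PySem.Set.ofList (PySem.List.pyRange 0 24 1)
  else
    match PySem.Int.ofStr? day_code with
    | none => []   -- unreachable under Pre_: int(day_code) raises ValueError
    | some d_int =>
      let target_mask : Int :=
        if d_int = 0 then 64 else if d_int = 1 then 1 else if d_int = 2 then 2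
        else if d_int = 3 then 4 else if d_int = 4 then 8 else if d_int = 5 then 16
        else if d_int = 6 then 32 else 0
      freq_data.foldl (fun valid kv => gvhA_mask target_mask valid kv.1 kv.2) PySem.Set.empty

-- ===== PORT B =====
-- B's try-block for one mask: `none` = an exception caught by `except Exception: pass`;
-- `some valid` unchanged = B's `continue`
def gvhB_try (target_mask : Int) (valid : PySem.Set Int) (mask_str : String)
    (timings : List (String × List String)) : Option (PySem.Set Int) :=
  match PySem.Int.ofStr? mask_str with
  | none => none
  | some mask =>
    if PySem.Int.band mask target_mask ≤ 0 then some valid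
    else
      match timings.mapM (fun kv => PySem.Int.ofStr? kv.1),                          -- starts
            timings.mapM (fun kv => (PySem.List.pyGet? kv.2 0).bind PySem.Int.ofStr?) with -- ends
      | some starts, some ends =>
        let min_t := starts.foldl min 2400                       -- min([2400] + starts)
        let max_t := ends.foldl max 0                            -- max([0] + ends)
        let start_min := PySem.Int.floordiv min_t 100 * 60 + PySem.Int.mod min_t 100
        let end_min := PySem.Int.floordiv max_t 100 * 60 + PySem.Int.mod max_t 100 + 120
        let lo := -(PySem.Int.floordiv (-start_min) 60)          -- ceil(start_min / 60)
        let hi := PySem.Int.floordiv end_min 60                  -- floor(end_min / 60)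
        some (PySem.Set.update
          (PySem.Set.update valid (PySem.List.pyRange (max (lo - 24) 0) (min (hi - 24) 23 + 1) 1))
          (PySem.List.pyRange (max lo 0) (min hi 23 + 1) 1))
      | _, _ => none

def gvhB_mask (target_mask : Int) (valid : PySem.Set Int) (mask_str : String)
    (timings : List (String × List String)) : PySem.Set Int :=
  match gvhB_try target_mask valid mask_str timings with
  | none => valid
  | some v => v

def get_valid_hours_for_day_alt (freq_data : List (String × List (String × List String))) (day_code : String) : List Int :=
  if freq_data.isEmpty then PySem.Set.ofList (PySem.List.pyRange 0 24 1)
  else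
    match PySem.Int.ofStr? day_code with
    | none => []   -- unreachable under Pre_: int(day_code) raises ValueError
    | some d_int =>
      let target_mask : Int :=
        PySem.Dict.getD (PySem.Dict.ofList [((0:Int),(64:Int)),(1,1),(2,2),(3,4),(4,8),(5,16),(6,32)]) d_int 0
      freq_data.foldl (fun valid kv => gvhB_mask target_mask valid kv.1 kv.2) PySem.Set.empty

-- ===== PRECONDITION & SPEC =====
-- Pre_ excludes only the inputs on which A raises: when freq_data is non-empty,
-- int(day_code) is evaluated outside the try, so a non-int-like day_code raises ValueError.
def Pre_get_valid_hours_for_day (freq_data : List (String × List (String × List String))) (day_code : String) : Prop :=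
  freq_data = [] ∨ (PySem.Int.ofStr? day_code).isSome
instance (freq_data : List (String × List (String × List String))) (day_code : String) : Decidable (Pre_get_valid_hours_for_day freq_data day_code) := by unfold Pre_get_valid_hours_for_day; infer_instance
def pvWitness_get_valid_hours_for_day : (List (String × List (String × List String))) × String :=
  ([("1", [("0600", ["0620", "10"])])], "1")

def Spec_get_valid_hours_for_day (freq_data : List (String × List (String × List String))) (day_code : String) (out : List Int) : Prop := out = get_valid_hours_for_day_alt freq_data day_code
instance (freq_data : List (String × List (String × List String))) (day_code : String) (out : List Int) : Decidable (Spec_get_valid_hours_for_day freq_data day_code out) := by unfold Spec_get_valid_hours_for_day; infer_instance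

-- ===== CLAIM (what is proved, stated in full; the proofs are below) =====
def Claim_equal_get_valid_hours_for_day : Prop := ∀ (freq_data : List (String × List (String × List String))) (day_code : String), Dom_get_valid_hours_for_day freq_data day_code → Pre_get_valid_hours_for_day freq_data day_code → Spec_get_valid_hours_for_day freq_data day_code (get_valid_hours_for_day freq_data day_code)

-- ===== LEMMAS AND PROOFS =====

-- A's if-chain on d_int equals B's dict lookup
set_option maxHeartbeats 1000000 in
theorem gvh_target_mask_eq (d : Int) :
    (if d = 0 then (64:Int) else if d = 1 then 1 else if d = 2 then 2
     else if d = 3 then 4 else if d = 4 then 8 else if d = 5 then 16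
     else if d = 6 then 32 else 0)
    = PySem.Dict.getD (PySem.Dict.ofList [((0:Int),(64:Int)),(1,1),(2,2),(3,4),(4,8),(5,16),(6,32)]) d 0 := by
  have h : PySem.Dict.ofList [((0:Int),(64:Int)),(1,1),(2,2),(3,4),(4,8),(5,16),(6,32)]
       = PySem.Dict.mk [((0:Int),(64:Int)),(1,1),(2,2),(3,4),(4,8),(5,16),(6,32)] := by decide
  rw [h]
  simp only [PySem.Dict.getD_eq_get?_getD, PySem.Dict.get?_mk_cons]
  split_ifs <;> simp_all [PySem.Dict.get?]

-- A's interleaved min/max scan equals B's two comprehensions with min/max folds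
theorem gvh_scan_eq (l : List (String × List String)) (mn mx : Int) :
    gvhA_scan l mn mx =
      match l.mapM (fun kv => PySem.Int.ofStr? kv.1),
            l.mapM (fun kv => (PySem.List.pyGet? kv.2 0).bind PySem.Int.ofStr?) with
      | some starts, some ends => some (starts.foldl min mn, ends.foldl max mx)
      | _, _ => none := by
  induction l generalizing mn mx with
  | nil => rfl
  | cons kv rest ih =>
    obtain ⟨k, vals⟩ := kv
    simp only [gvhA_scan, List.mapM_cons]
    cases hg : PySem.List.pyGet? vals 0 with
    | none =>
      cases hk : PySem.Int.ofStr? k with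
      | none => simp
      | some s =>
        cases hs : rest.mapM (fun kv => PySem.Int.ofStr? kv.1) <;> simp
    | some e0 =>
      cases hk : PySem.Int.ofStr? k with
      | none => simp
      | some s =>
        cases he : PySem.Int.ofStr? e0 with
        | none =>
          cases hs : rest.mapM (fun kv => PySem.Int.ofStr? kv.1) <;> simp [he]
        | some e =>
          dsimp only
          rw [he]
          dsimp only
          rw [show (if s < mn then s else mn) = min mn s by split_ifs <;> omega,
              show (if e > mx then e else mx) = max mx e by split_ifs <;> omega, ih]
          cases hs : rest.mapM (fun kv => PySem.Int.ofStr? kv.1) <;>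
            cases hes : rest.mapM (fun kv => (PySem.List.pyGet? kv.2 0).bind PySem.Int.ofStr?) <;>
            simp [he]

-- the double conditional add of A's hour-loop body is a single conditional add
theorem gvh_body_eq (s e : Int) (v : PySem.Set Int) (h : Int) :
    (let h_mins := h * 60
     let v' := if s ≤ h_mins ∧ h_mins ≤ e then PySem.Set.add v h else v
     let h_mins_next := (h + 24) * 60
     if s ≤ h_mins_next ∧ h_mins_next ≤ e then PySem.Set.add v' h else v')
    = if (s ≤ h * 60 ∧ h * 60 ≤ e) ∨ (s ≤ (h + 24) * 60 ∧ (h + 24) * 60 ≤ e)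
      then PySem.Set.add v h else v := by
  by_cases h1 : s ≤ h * 60 ∧ h * 60 ≤ e <;>
    by_cases h2 : s ≤ (h + 24) * 60 ∧ (h + 24) * 60 ≤ e <;>
    simp [h1, h2]

-- folding Set.add skips elements already guaranteed present
theorem gvh_foldl_add_filter (N : List Int) (W : List Int) :
    ∀ (acc : PySem.Set Int), (∀ x ∈ W, x ∈ acc) →
      N.foldl PySem.Set.add acc = (N.filter (fun x => !(decide (x ∈ W)))).foldl PySem.Set.add acc := by
  induction N with
  | nil => intro acc _; rfl
  | cons x rest ih =>
    intro acc hW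
    by_cases hx : x ∈ W
    · have hacc : PySem.Set.add acc x = acc := PySem.Set.add_of_mem (hW x hx)
      simp only [List.foldl_cons, List.filter_cons, hx, decide_true, Bool.not_true,
        Bool.false_eq_true, if_false, hacc]
      exact ih acc hW
    · simp only [List.foldl_cons, List.filter_cons, hx, decide_false, Bool.not_false, if_true]
      exact ih (PySem.Set.add acc x) (fun y hy => by
        rw [PySem.Set.mem_add]; exact Or.inl (hW y hy))

-- two Pairwise-(<) integer lists with the same members are equal
theorem gvh_eq_of_sorted (l1 l2 : List Int) (h1 : l1.Pairwise (· < ·)) (h2 : l2.Pairwise (· < ·))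
    (hm : ∀ x, x ∈ l1 ↔ x ∈ l2) : l1 = l2 :=
  List.Perm.eq_of_pairwise (fun _ _ _ _ hab hba => le_antisymm hab hba)
    (h1.imp le_of_lt) (h2.imp le_of_lt)
    ((List.perm_ext_iff_of_nodup h1.nodup h2.nodup).2 hm)

-- the core band lemma: A's 24-hour loop = B's two pyRange updates
theorem gvh_hours_eq (s e : Int) (valid : PySem.Set Int) :
    gvhA_hours s e valid =
      PySem.Set.update
        (PySem.Set.update valid
          (PySem.List.pyRange (max (-(PySem.Int.floordiv (-s) 60) - 24) 0)
            (min (PySem.Int.floordiv e 60 - 24) 23 + 1) 1))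
        (PySem.List.pyRange (max (-(PySem.Int.floordiv (-s) 60)) 0)
          (min (PySem.Int.floordiv e 60) 23 + 1) 1) := by
  set d1 := PySem.Int.floordiv (-s) 60 with hd1
  set d2 := PySem.Int.floordiv e 60 with hd2
  set W := PySem.List.pyRange (max (-d1 - 24) 0) (min (d2 - 24) 23 + 1) 1 with hW
  set N := PySem.List.pyRange (max (-d1) 0) (min d2 23 + 1) 1 with hN
  have br : ∀ q : Int, (-q ≤ d1 ↔ s ≤ q * 60) ∧ (q ≤ d2 ↔ q * 60 ≤ e) := by
    intro q
    constructor
    · rw [hd1, PySem.Int.le_floordiv_iff_mul_le (by norm_num)]; omega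
    · rw [hd2, PySem.Int.le_floordiv_iff_mul_le (by norm_num)]
  -- A's loop as a fold of Set.add over the filtered hour list
  have hA : gvhA_hours s e valid =
      ((PySem.List.pyRange 0 24 1).filter (fun h =>
        decide ((s ≤ h * 60 ∧ h * 60 ≤ e) ∨ (s ≤ (h + 24) * 60 ∧ (h + 24) * 60 ≤ e)))).foldl
        PySem.Set.add valid := by
    rw [gvhA_hours, List.foldl_filter]
    congr 1
    funext v h
    rw [gvh_body_eq]
    by_cases hc : (s ≤ h * 60 ∧ h * 60 ≤ e) ∨ (s ≤ (h + 24) * 60 ∧ (h + 24) * 60 ≤ e) <;>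
      simp [hc]
  rw [hA]
  -- B's two updates as one fold over W ++ N, then drop N-elements already in W
  have hB : PySem.Set.update (PySem.Set.update valid W) N = (W ++ N).foldl PySem.Set.add valid := by
    simp [PySem.Set.update, List.foldl_append]
  rw [hB, List.foldl_append]
  have hWsub : ∀ x ∈ W, x ∈ W.foldl PySem.Set.add valid := by
    intro x hx
    rw [show W.foldl PySem.Set.add valid
        = W.foldl (fun s b => PySem.Set.add s ((fun y => y) b)) valid from rfl,
      PySem.Set.mem_foldl_add]
    exact Or.inr ⟨x, hx, rfl⟩
  rw [gvh_foldl_add_filter N W _ hWsub, ← List.foldl_append]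
  -- identify the two element lists: both strictly increasing with the same members
  congr 1
  apply gvh_eq_of_sorted
  · exact (PySem.List.pairwise_lt_pyRange_one 0 24).filter _
  · rw [List.pairwise_append]
    refine ⟨PySem.List.pairwise_lt_pyRange_one _ _,
      ((PySem.List.pairwise_lt_pyRange_one _ _).filter _), ?_⟩
    intro x hx y hy
    rw [hW, PySem.List.mem_pyRange_one] at hx
    rw [List.mem_filter] at hy
    have hy1 := hy.1
    have hy2 := hy.2
    rw [hN, PySem.List.mem_pyRange_one] at hy1
    simp only [Bool.not_eq_eq_eq_not, Bool.not_true, decide_eq_false_iff_not, hW,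
      PySem.List.mem_pyRange_one] at hy2
    omega
  · intro x
    have hx := br x
    have hx24 := br (x + 24)
    simp only [List.mem_filter, List.mem_append, hW, hN, PySem.List.mem_pyRange_one,
      decide_eq_true_eq, Bool.not_eq_eq_eq_not, Bool.not_true, decide_eq_false_iff_not]
    omega

-- per-mask equality
theorem gvh_mask_eq (target : Int) (valid : PySem.Set Int) (k : String)
    (t : List (String × List String)) :
    gvhA_mask target valid k t = gvhB_mask target valid k t := by
  unfold gvhA_mask gvhB_mask gvhB_try
  cases hk : PySem.Int.ofStr? k with
  | none => rfl
  | some mask =>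
    dsimp only
    by_cases hb : PySem.Int.band mask target ≤ 0
    · rw [if_neg (not_lt.mpr hb), if_pos hb]
    · rw [if_pos (not_le.mp hb), if_neg hb, gvh_scan_eq]
      cases hs : t.mapM (fun kv => PySem.Int.ofStr? kv.1) with
      | none => rfl
      | some starts =>
        cases hes : t.mapM (fun kv => (PySem.List.pyGet? kv.2 0).bind PySem.Int.ofStr?) with
        | none => rfl
        | some ends =>
          dsimp only
          rw [gvh_hours_eq]
          simp [gvhA_toMins]

-- the whole fold over freq_data, mask by mask
theorem gvh_foldl_eq (l : List (String × List (String × List String))) (target : Int)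
    (v : PySem.Set Int) :
    l.foldl (fun valid kv => gvhA_mask target valid kv.1 kv.2) v
      = l.foldl (fun valid kv => gvhB_mask target valid kv.1 kv.2) v := by
  induction l generalizing v with
  | nil => rfl
  | cons kv rest ih =>
    simp only [List.foldl_cons]
    rw [gvh_mask_eq]
    exact ih _

-- ===== VERDICT (by name: the statement is the Claim_ definition above) =====
theorem get_valid_hours_for_day_spec : Claim_equal_get_valid_hours_for_day := by
  intro freq_data day_code _ hpre
  unfold Spec_get_valid_hours_for_day get_valid_hours_for_day get_valid_hours_for_day_alt
  by_cases hfd : freq_data.isEmpty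
  · rw [if_pos hfd, if_pos hfd]
  · rw [if_neg hfd, if_neg hfd]
    rcases hpre with h | h
    · exact absurd (by simp [h] : freq_data.isEmpty = true) hfd
    · cases hdc : PySem.Int.ofStr? day_code with
      | none => simp [hdc] at h
      | some d =>
        dsimp only
        rw [gvh_target_mask_eq]
        exact gvh_foldl_eq freq_data _ _
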